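-- pv_equiv track=rewrite | github.com/Pulsar-kkaturi/mobydick-tennis | logic/schedule.py | _pair_doubles
-- ===== SOURCE A (Python) =====
-- def _pair_doubles(group: list, wc_map: dict):
--     """
--     4명을 (team1, team2) 2인 팀으로 나눔.
--     WC 선수끼리 같은 팀이 되지 않는 페어링 우선 선택.
--     """
--     p = group[:]
--     # 가능한 3가지 페어링
--     pairings = [
--         ([p[0], p[1]], [p[2], p[3]]),
--         ([p[0], p[2]], [p[1], p[3]]),
--         ([p[0], p[3]], [p[1], p[2]]),
--     ]
--     for t1, t2 in pairings:
--         wc_clash = (wc_map.get(t1[0]) and wc_map.get(t1[1])) or \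
--                    (wc_map.get(t2[0]) and wc_map.get(t2[1]))
--         if not wc_clash:
--             return t1, t2
--     # 모든 페어링에서 WC 충돌 → 첫 번째 페어링으로 강제 배정
--     return pairings[0]
-- ===== SOURCE B (Python) =====
-- def _pair_doubles(group: list, wc_map: dict):
--     """
--     4명을 (team1, team2) 2인 팀으로 나눔.
--     WC 선수끼리 같은 팀이 되지 않는 페어링 우선 선택.
--     """
--     p = group[:]
--     # indices (among the four) of wild-card players, in order
--     w = tuple(i for i in range(4) if wc_map.get(p[i]))
--     # the default split [p0,p1]/[p2,p3] clashes only when exactly the pair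
--     # (0,1) or the pair (2,3) are the WC players; then [p0,p2]/[p1,p3]
--     # separates them.  In every other case (including >=3 WC, where every
--     # split clashes) the default split is what is wanted.
--     if w == (0, 1) or w == (2, 3):
--         return [p[0], p[2]], [p[1], p[3]]
--     return [p[0], p[1]], [p[2], p[3]]
-- ===== Notes on version B (the rewrite author's own statement) =====
-- stated objective: simpler
-- what changed: Instead of enumerating the three candidate pairings and testing each for a WC clash in a loop, B computes the tuple of WC indices among the four players once and returns the alternate split [p0,p2]/[p1,p3] exactly when the WC players are precisely positions (0,1) or (2,3), otherwise the default split [p0,p1]/[p2,p3].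
import Mathlib
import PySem

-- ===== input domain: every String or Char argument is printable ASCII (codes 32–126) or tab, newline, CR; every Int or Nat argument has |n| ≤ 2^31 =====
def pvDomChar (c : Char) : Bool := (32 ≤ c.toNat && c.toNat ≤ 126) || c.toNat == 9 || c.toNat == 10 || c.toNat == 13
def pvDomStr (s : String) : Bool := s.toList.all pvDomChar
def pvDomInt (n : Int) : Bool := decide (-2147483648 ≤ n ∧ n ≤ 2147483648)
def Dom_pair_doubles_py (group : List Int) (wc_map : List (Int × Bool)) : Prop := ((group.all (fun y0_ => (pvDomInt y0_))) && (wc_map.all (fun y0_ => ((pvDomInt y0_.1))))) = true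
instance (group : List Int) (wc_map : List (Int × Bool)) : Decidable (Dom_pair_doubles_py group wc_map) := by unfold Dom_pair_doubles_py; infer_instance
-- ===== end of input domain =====

-- B replaces A's scan over the three candidate pairings by a single computation of
-- the WC index tuple and a direct choice of the split (objective: simpler).

-- ===== PORT A =====
-- wc_map.get(k) used in a boolean position: missing key behaves as False
def pvWcGet (wc_map : List (Int × Bool)) (k : Int) : Bool :=
  ((PySem.Dict.mk wc_map).get? k).getD false

-- the for-loop over `pairings`: first pairing without a WC clash (t[0]/t[1] are
-- always in range by construction, so the .getD 0 defaults are never taken)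
def pvFindPairing (wc_map : List (Int × Bool)) : List (List Int × List Int) → Option (List Int × List Int)
  | [] => none
  | (t1, t2) :: rest =>
    let clash := (pvWcGet wc_map ((PySem.List.pyGet? t1 0).getD 0) && pvWcGet wc_map ((PySem.List.pyGet? t1 1).getD 0)) ||
                 (pvWcGet wc_map ((PySem.List.pyGet? t2 0).getD 0) && pvWcGet wc_map ((PySem.List.pyGet? t2 1).getD 0))
    if !clash then some (t1, t2) else pvFindPairing wc_map rest

def pair_doubles_py (group : List Int) (wc_map : List (Int × Bool)) : List Int × List Int :=
  let p := group  -- p = group[:]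
  match PySem.List.pyGet? p 0, PySem.List.pyGet? p 1, PySem.List.pyGet? p 2, PySem.List.pyGet? p 3 with
  | some p0, some p1, some p2, some p3 =>
    let pairings := [([p0,p1],[p2,p3]), ([p0,p2],[p1,p3]), ([p0,p3],[p1,p2])]
    match pvFindPairing wc_map pairings with
    | some r => r
    | none => ([p0,p1],[p2,p3])   -- return pairings[0]
  | _, _, _, _ => ([], [])        -- IndexError in Python; excluded by Pre_

-- ===== PORT B =====
def pair_doubles_py_alt (group : List Int) (wc_map : List (Int × Bool)) : List Int × List Int :=
  let p := group  -- p = group[:]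
  match PySem.List.pyGet? p 0 with
  | none => ([], [])              -- IndexError in Python; excluded by Pre_
  | some p0 =>
  match PySem.List.pyGet? p 1 with
  | none => ([], [])
  | some p1 =>
  match PySem.List.pyGet? p 2 with
  | none => ([], [])
  | some p2 =>
  match PySem.List.pyGet? p 3 with
  | none => ([], [])
  | some p3 =>
    -- w = tuple(i for i in range(4) if wc_map.get(p[i]))
    let w := (PySem.List.pyRange 0 4 1).filter
      (fun i => ((PySem.Dict.mk wc_map).get? ((PySem.List.pyGet? [p0,p1,p2,p3] i).getD 0)).getD false)
    if w = [0, 1] ∨ w = [2, 3] then ([p0,p2],[p1,p3]) else ([p0,p1],[p2,p3])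

-- ===== PRECONDITION & SPEC =====
-- A indexes p[0]..p[3] and raises IndexError when group has fewer than 4 elements
def Pre_pair_doubles_py (group : List Int) (wc_map : List (Int × Bool)) : Prop := 4 ≤ group.length
instance (group : List Int) (wc_map : List (Int × Bool)) : Decidable (Pre_pair_doubles_py group wc_map) := by unfold Pre_pair_doubles_py; infer_instance
def pvWitness_pair_doubles_py : List Int × (List (Int × Bool)) := ([1, 2, 3, 4], [(1, true), (3, true)])

def Spec_pair_doubles_py (group : List Int) (wc_map : List (Int × Bool)) (out : List Int × List Int) : Prop := out = pair_doubles_py_alt group wc_map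
instance (group : List Int) (wc_map : List (Int × Bool)) (out : List Int × List Int) : Decidable (Spec_pair_doubles_py group wc_map out) := by unfold Spec_pair_doubles_py; infer_instance

-- ===== CLAIM (what is proved, stated in full; the proofs are below) =====
def Claim_equal_pair_doubles_py : Prop := ∀ (group : List Int) (wc_map : List (Int × Bool)), Dom_pair_doubles_py group wc_map → Pre_pair_doubles_py group wc_map → Spec_pair_doubles_py group wc_map (pair_doubles_py group wc_map)

-- ===== LEMMAS AND PROOFS =====

theorem pair_doubles_py_main (p0 p1 p2 p3 : Int) (rest : List Int) (wc_map : List (Int × Bool)) :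
    pair_doubles_py (p0 :: p1 :: p2 :: p3 :: rest) wc_map
      = pair_doubles_py_alt (p0 :: p1 :: p2 :: p3 :: rest) wc_map := by
  have hr : PySem.List.pyRange 0 4 1 = [0, 1, 2, 3] := by decide
  have a0 : PySem.List.pyGet? (p0 :: p1 :: p2 :: p3 :: rest) (0 : Int) = some p0 := by
    simp [PySem.List.pyGet?, PySem.List.pyIdx?]; rw [if_pos (by omega)]; simp
  have a1 : PySem.List.pyGet? (p0 :: p1 :: p2 :: p3 :: rest) (1 : Int) = some p1 := by
    simp [PySem.List.pyGet?, PySem.List.pyIdx?]; rw [if_pos (by omega)]; simp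
  have a2 : PySem.List.pyGet? (p0 :: p1 :: p2 :: p3 :: rest) (2 : Int) = some p2 := by
    simp [PySem.List.pyGet?, PySem.List.pyIdx?]; rw [if_pos (by omega)]; simp
  have a3 : PySem.List.pyGet? (p0 :: p1 :: p2 :: p3 :: rest) (3 : Int) = some p3 := by
    simp [PySem.List.pyGet?, PySem.List.pyIdx?]; rw [if_pos (by omega)]; simp
  have g0 : PySem.List.pyGet? [p0, p1, p2, p3] (0 : Int) = some p0 := by
    simp [PySem.List.pyGet?, PySem.List.pyIdx?]
  have g1 : PySem.List.pyGet? [p0, p1, p2, p3] (1 : Int) = some p1 := by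
    simp [PySem.List.pyGet?, PySem.List.pyIdx?]
  have g2 : PySem.List.pyGet? [p0, p1, p2, p3] (2 : Int) = some p2 := by
    simp [PySem.List.pyGet?, PySem.List.pyIdx?]
  have g3 : PySem.List.pyGet? [p0, p1, p2, p3] (3 : Int) = some p3 := by
    simp [PySem.List.pyGet?, PySem.List.pyIdx?]
  simp only [pair_doubles_py, pair_doubles_py_alt, a0, a1, a2, a3, hr, List.filter,
    g0, g1, g2, g3, pvFindPairing, pvWcGet]
  cases h0 : ((PySem.Dict.mk wc_map).get? p0).getD false <;>
    cases h1 : ((PySem.Dict.mk wc_map).get? p1).getD false <;>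
      cases h2 : ((PySem.Dict.mk wc_map).get? p2).getD false <;>
        cases h3 : ((PySem.Dict.mk wc_map).get? p3).getD false <;>
          simp [h0, h1, h2, h3]

-- ===== VERDICT (by name: the statement is the Claim_ definition above) =====
theorem pair_doubles_py_spec : Claim_equal_pair_doubles_py := by
  intro group wc_map _ hpre
  unfold Spec_pair_doubles_py
  match group, hpre with
  | p0 :: p1 :: p2 :: p3 :: rest, _ => exact pair_doubles_py_main p0 p1 p2 p3 rest wc_map
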